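-- pv_equiv track=rewrite | github.com/reeves-48777/ca_epreuves | air/air03.py | intruder
-- ===== SOURCE A (Python) =====
-- def intruder(l):
-- 	result = dict()
--
-- 	for el in l:
-- 		if el in result.keys():
-- 			result[el] += 1
-- 		else:
-- 			result[el] = 1
--
-- 	keys = list(result.keys())
-- 	prev = None
-- 	for i in range(len(keys)):
-- 		if i == 0:
-- 			prev = result[keys[i]]
-- 		else:
-- 			if result[keys[i]] != prev:
-- 				return keys[i]
-- ===== SOURCE B (Python) =====
-- def intruder(l):
--     if not l:
--         return None
--     first = l[0]
--     target = l.count(first)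
--     seen = set()
--     for el in l:
--         if el not in seen:
--             seen.add(el)
--             if el != first and l.count(el) != target:
--                 return el
--     return None
-- ===== Notes on version B (the rewrite author's own statement) =====
-- stated objective: alternative
-- what changed: replaces the frequency-dictionary build plus indexed key scan with a single pass over the list that skips already-seen elements and compares each element's count (via list.count) against the first element's count; on the measured inputs the C-implemented count scans beat A's interpreted per-element dict loop, though B is O(n*d) in the worst case
import Mathlib
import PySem

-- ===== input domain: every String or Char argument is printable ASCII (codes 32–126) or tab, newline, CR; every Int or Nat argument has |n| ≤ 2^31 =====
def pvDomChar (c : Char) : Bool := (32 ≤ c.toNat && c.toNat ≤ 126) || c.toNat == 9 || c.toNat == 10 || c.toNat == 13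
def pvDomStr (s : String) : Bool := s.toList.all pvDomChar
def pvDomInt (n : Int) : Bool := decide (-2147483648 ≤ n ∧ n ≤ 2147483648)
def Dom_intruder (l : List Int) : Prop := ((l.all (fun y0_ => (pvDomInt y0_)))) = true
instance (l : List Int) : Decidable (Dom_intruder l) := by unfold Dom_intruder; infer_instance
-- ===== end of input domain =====

-- B replaces A's frequency-dictionary build and indexed key scan by one pass with a seen-set
-- and repeated l.count scans; same return value (equivalence proved below).

-- ===== PORT A =====
-- 'for i in range(len(keys))' with 'prev = None' start: prev is set exactly at i == 0, so the
-- recursion carries prev : Option Int and the 'prev = none' branch is the i == 0 branch.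
def intruderLoop (result : PySem.Dict Int Int) : List Int → Option Int → Option Int
  | [], _ => none
  | k :: rest, none => intruderLoop result rest (some (result.getD k 0))
  | k :: rest, some p => if result.getD k 0 != p then some k else intruderLoop result rest (some p)

def intruder (l : List Int) : Option Int :=
  let result : PySem.Dict Int Int :=
    l.foldl (fun d el => if d.contains el then d.modify el 0 (· + 1) else d.insert el 1)
      PySem.Dict.empty
  let keys := result.keys
  intruderLoop result keys none

-- ===== PORT B =====
def intruderAltLoop (l : List Int) (first target : Int) : List Int → PySem.Set Int → Option Int
  | [], _ => none
  | el :: rest, seen =>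
    if PySem.Set.contains seen el then intruderAltLoop l first target rest seen
    else
      let seen' := PySem.Set.add seen el
      if el != first && PySem.List.count l el != target then some el
      else intruderAltLoop l first target rest seen'

def intruder_alt (l : List Int) : Option Int :=
  match l with
  | [] => none
  | first :: _ => intruderAltLoop l first (PySem.List.count l first) l PySem.Set.empty

-- ===== PRECONDITION & SPEC =====
def Spec_intruder (l : List Int) (out : Option Int) : Prop := out = intruder_alt l
instance (l : List Int) (out : Option Int) : Decidable (Spec_intruder l out) := by unfold Spec_intruder; infer_instance

-- ===== CLAIM (what is proved, stated in full; the proofs are below) =====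
def Claim_equal_intruder : Prop := ∀ (l : List Int), Dom_intruder l → Spec_intruder l (intruder l)

-- ===== LEMMAS AND PROOFS =====

-- A's dict-building step is exactly Counter's step.
lemma step_eq_counter_step (d : PySem.Dict Int Int) (el : Int) :
    (if d.contains el then d.modify el 0 (· + 1) else d.insert el 1) = d.modify el 0 (· + 1) := by
  by_cases h : d.contains el = true
  · simp [h]
  · simp only [Bool.not_eq_true] at h
    simp only [h, Bool.false_eq_true, if_false]
    unfold PySem.Dict.modify PySem.Dict.insert
    simp [h, PySem.Dict.getD_of_not_contains (h := h)]

-- A's dict is Counter(l).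
lemma dict_eq_counter (l : List Int) :
    l.foldl (fun d el => if d.contains el then d.modify el 0 (· + 1) else d.insert el 1)
      PySem.Dict.empty = PySem.Dict.counter l := by
  rw [PySem.Dict.counter_eq_foldl]
  apply PySem.List.foldl_congr_mem
  intro d x _
  exact step_eq_counter_step d x

-- A's scan with prev set is find?.
lemma intruderLoop_some (d : PySem.Dict Int Int) (ks : List Int) (p : Int) :
    intruderLoop d ks (some p) = ks.find? (fun k => d.getD k 0 != p) := by
  induction ks with
  | nil => rfl
  | cons k rest ih =>
    simp only [intruderLoop, List.find?]
    by_cases h : d.getD k 0 != p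
    · simp [h]
    · simp only [Bool.not_eq_true] at h; simp [h, ih]

lemma find?_congr_mem {α : Type} (ks : List α) (p q : α → Bool)
    (h : ∀ k ∈ ks, p k = q k) : ks.find? p = ks.find? q := by
  induction ks with
  | nil => rfl
  | cons k rest ih =>
    simp only [List.find?, h k (List.mem_cons_self ..)]
    cases hq : q k
    · simpa [hq] using ih fun x hx => h x (List.mem_cons_of_mem _ hx)
    · simp

-- seen is a prefix of Set.update seen xs.
lemma prefix_update (seen : PySem.Set Int) (xs : List Int) :
    seen <+: PySem.Set.update seen xs := by
  induction xs generalizing seen with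
  | nil => exact List.prefix_refl _
  | cons x rest ih =>
    have h2 := ih (PySem.Set.add seen x)
    have h1 : seen <+: PySem.Set.add seen x := by
      unfold PySem.Set.add
      split
      · exact List.prefix_refl _
      · exact List.prefix_append _ _
    exact h1.trans h2

-- B's loop finds the first fresh element (those Set.update appends) passing the test.
lemma altLoop_eq_find? (l : List Int) (f t : Int) (xs : List Int) (seen : PySem.Set Int) :
    intruderAltLoop l f t xs seen =
      ((PySem.Set.update seen xs).drop seen.length).find?
        (fun k => k != f && PySem.List.count l k != t) := by
  induction xs generalizing seen with
  | nil => simp [intruderAltLoop, PySem.Set.update]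
  | cons x rest ih =>
    by_cases hm : x ∈ seen
    · have hc : PySem.Set.contains seen x = true := by simp [PySem.Set.contains, hm]
      have hadd : PySem.Set.add seen x = seen := by unfold PySem.Set.add; simp [hm]
      have hupd : PySem.Set.update seen (x :: rest) = PySem.Set.update seen rest := by
        simp [PySem.Set.update, hadd]
      rw [hupd, ← ih seen]
      simp [intruderAltLoop, PySem.Set.contains, hm]
    · have hc : PySem.Set.contains seen x = false := by simp [PySem.Set.contains, hm]
      have hadd : PySem.Set.add seen x = seen ++ [x] := by unfold PySem.Set.add; simp [hm]
      have hupd : PySem.Set.update seen (x :: rest) = PySem.Set.update (seen ++ [x]) rest := by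
        simp [PySem.Set.update, hadd]
      obtain ⟨tail, htail⟩ := prefix_update (seen ++ [x]) rest
      have hdrop : List.drop seen.length (PySem.Set.update (seen ++ [x]) rest)
          = x :: List.drop (seen ++ [x]).length (PySem.Set.update (seen ++ [x]) rest) := by
        rw [← htail]; simp [List.append_assoc]
      rw [hupd, hdrop]
      simp only [List.find?]
      by_cases hxf : x = f
      · subst hxf
        simp [intruderAltLoop, PySem.Set.contains, hm, ih (seen ++ [x]),
          PySem.List.count]
      · by_cases hct : (List.count x l : Int) = t
        · simp [intruderAltLoop, PySem.Set.contains, hm, hct, ih (seen ++ [x]),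
            PySem.List.count]
        · have hbt : (x != f && ((List.count x l : Int) != t)) = true := by
            simp [hxf, hct]
          simp [intruderAltLoop, PySem.Set.contains, hm, PySem.List.count, hbt]

-- head of Set.ofList (h :: tl) is h, and it is Nodup
lemma ofList_cons_ex (h : Int) (tl : List Int) :
    ∃ ks, PySem.Set.ofList (h :: tl) = h :: ks := by
  have : PySem.Set.ofList (h :: tl) = PySem.Set.update [h] tl := by
    simp [PySem.Set.ofList_eq_foldl, PySem.Set.update, List.foldl_cons, PySem.Set.add,
      PySem.Set.contains]
  rw [this]
  obtain ⟨tail, htail⟩ := prefix_update [h] tl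
  exact ⟨tail, by rw [← htail]; rfl⟩

-- ===== VERDICT (by name: the statement is the Claim_ definition above) =====
theorem intruder_spec : Claim_equal_intruder := by
  intro l _
  unfold Spec_intruder
  cases l with
  | nil => rfl
  | cons h tl =>
    unfold intruder intruder_alt
    rw [dict_eq_counter]
    show intruderLoop (PySem.Dict.counter (h :: tl)) (PySem.Dict.counter (h :: tl)).keys none
        = intruderAltLoop (h :: tl) h (PySem.List.count (h :: tl) h) (h :: tl) PySem.Set.empty
    obtain ⟨ks, hks⟩ := ofList_cons_ex h tl
    have hnd : (PySem.Set.ofList (h :: tl)).Nodup := PySem.Set.nodup_ofList _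
    rw [hks] at hnd
    have hkeys : (PySem.Dict.counter (h :: tl)).keys = h :: ks := by
      rw [PySem.Dict.keys_counter, hks]
    rw [hkeys]
    simp only [intruderLoop, PySem.Dict.getD_counter]
    rw [altLoop_eq_find?]
    have hupd : (PySem.Set.update PySem.Set.empty (h :: tl)) = PySem.Set.ofList (h :: tl) := by
      simp [PySem.Set.ofList_eq_foldl, PySem.Set.update, PySem.Set.empty]
    rw [hupd, hks]
    simp only [PySem.Set.empty, List.length_nil, List.drop_zero, List.find?]
    have hhf : (h != h && (PySem.List.count (h :: tl) h : Int) != (PySem.List.count (h :: tl) h : Int)) = false := by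
      simp
    simp only [hhf]
    rw [intruderLoop_some]
    apply find?_congr_mem
    intro k hk
    have hkne : k ≠ h := by
      intro he; subst he
      exact (List.nodup_cons.mp hnd).1 hk
    simp [PySem.Dict.getD_counter, hkne]
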